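-- pv_equiv track=rewrite | github.com/GimYoungPhil/Cracking_Codes_with_Python | src/ch17/my/makeDictPatterns.py | patternDict
-- ===== SOURCE A (Python) =====
-- def patternDict(word):
--     word = word.upper()
--     dic = {}
--     list = []
--     counter = 0
--
--     for ch in word:
--         if ch in dic:
--             list.append(dic[ch])
--         else:
--             character = str(counter)
--             dic[ch] = character
--             list.append(character)
--             counter = counter + 1
--
--     return '.'.join(list)
-- ===== SOURCE B (Python) =====
-- def patternDict(word):
--     word = word.upper()
--     return '.'.join(str(len(set(word[:word.index(ch)]))) for ch in word)
-- ===== Notes on version B (the rewrite author's own statement) =====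
-- stated objective: alternative
-- what changed: B drops A's dict/output-list/counter state entirely: each character's number is computed independently as the count of distinct letters strictly before that character's first occurrence (len(set(w[:w.index(ch)]))), a dictionary-free per-character formula instead of A's stateful build-or-lookup loop; it trades O(n) for O(n^2) work.
import Mathlib
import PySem

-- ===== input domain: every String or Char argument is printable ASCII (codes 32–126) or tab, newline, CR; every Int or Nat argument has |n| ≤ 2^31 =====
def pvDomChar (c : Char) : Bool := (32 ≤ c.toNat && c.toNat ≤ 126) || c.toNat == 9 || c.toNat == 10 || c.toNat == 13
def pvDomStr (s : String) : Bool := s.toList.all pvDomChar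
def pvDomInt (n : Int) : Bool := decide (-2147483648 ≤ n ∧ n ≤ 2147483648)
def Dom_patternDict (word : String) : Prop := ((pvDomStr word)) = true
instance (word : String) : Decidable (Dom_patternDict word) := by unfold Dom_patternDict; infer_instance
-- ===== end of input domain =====

-- B replaces A's stateful dict/list/counter loop by a dictionary-free per-character formula:
-- each letter's number is the count of distinct letters before its first occurrence; objective: alternative.

-- ===== PORT A =====
def patternDictLoop (st : PySem.Dict Char String × List String × Int) (ch : Char) :
    PySem.Dict Char String × List String × Int :=
  let (dic, lst, counter) := st
  if dic.contains ch then
    (dic, lst ++ [dic.getD ch ""], counter)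
  else
    let character := PySem.Int.toStr counter
    (dic.insert ch character, lst ++ [character], counter + 1)

def patternDict (word : String) : String :=
  let w := PySem.Str.upper word
  let st := w.toList.foldl patternDictLoop (PySem.Dict.empty, [], 0)
  PySem.Str.join "." st.2.1

-- ===== PORT B =====
-- str(len(set(w[:w.index(ch)]))) for ch in w; w.index(ch) never raises here since ch is
-- drawn from w itself, so '(index? …).getD 0' is exact (the getD default is unreachable).
def patternDict_alt (word : String) : String :=
  let w := (PySem.Str.upper word).toList
  PySem.Str.join "." (w.map (fun ch =>
    PySem.Int.toStr (PySem.Set.len (PySem.Set.ofList (w.take ((PySem.List.index? w ch).getD 0))))))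

-- ===== PRECONDITION & SPEC =====
def Spec_patternDict (word : String) (out : String) : Prop := out = patternDict_alt word
instance (word : String) (out : String) : Decidable (Spec_patternDict word out) := by unfold Spec_patternDict; infer_instance

-- ===== CLAIM (what is proved, stated in full; the proofs are below) =====
def Claim_equal_patternDict : Prop := ∀ (word : String), Dom_patternDict word → Spec_patternDict word (patternDict word)

-- ===== LEMMAS AND PROOFS =====

/-- The common reference: the pattern list, with `K` the distinct letters seen so far. -/
def refPat (K l : List Char) : List String :=
  match l with
  | [] => []
  | ch :: t =>
    if ch ∈ K then PySem.Int.toStr (K.idxOf ch : Int) :: refPat K t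
    else PySem.Int.toStr (K.length : Int) :: refPat (K ++ [ch]) t

lemma set_add_of_mem {K : List Char} {c : Char} (h : c ∈ K) : PySem.Set.add K c = K := by
  simp [PySem.Set.add, PySem.Set.contains, h]

lemma set_add_of_not_mem {K : List Char} {c : Char} (h : c ∉ K) :
    PySem.Set.add K c = K ++ [c] := by
  simp [PySem.Set.add, PySem.Set.contains, h]

/-- `Set.update K l` extends `K` by a suffix. -/
lemma update_prefix : ∀ (l K : List Char), ∃ t, PySem.Set.update K l = K ++ t := by
  intro l
  induction l with
  | nil => intro K; exact ⟨[], by simp [PySem.Set.update]⟩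
  | cons c t ih =>
    intro K
    rw [PySem.Set.update_cons]
    by_cases hc : c ∈ K
    · rw [set_add_of_mem hc]; exact ih K
    · rw [set_add_of_not_mem hc]
      obtain ⟨t', ht'⟩ := ih (K ++ [c])
      exact ⟨[c] ++ t', by simpa using ht'⟩

/-- A's loop, from any state whose dict/counter describe the seen-letter list `K`. -/
lemma A_loop : ∀ (l K : List Char) (dic : PySem.Dict Char String) (acc : List String),
    (∀ c : Char, dic.get? c =
      if c ∈ K then some (PySem.Int.toStr (K.idxOf c : Int)) else none) →
    (l.foldl patternDictLoop (dic, acc, (K.length : Int))).2.1 = acc ++ refPat K l := by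
  intro l
  induction l with
  | nil => intro K dic acc _; simp [refPat]
  | cons ch t ih =>
    intro K dic acc hinv
    have hcont : dic.contains ch = decide (ch ∈ K) := by
      rw [PySem.Dict.contains_eq_isSome_get?, hinv ch]
      by_cases h : ch ∈ K <;> simp [h]
    by_cases hch : ch ∈ K
    · have hstep : patternDictLoop (dic, acc, (K.length : Int)) ch =
          (dic, acc ++ [PySem.Int.toStr (K.idxOf ch : Int)], (K.length : Int)) := by
        simp [patternDictLoop, hcont, hch, PySem.Dict.getD, hinv ch]
      rw [List.foldl_cons, hstep, ih K dic _ hinv, refPat]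
      simp [hch]
    · have hstep : patternDictLoop (dic, acc, (K.length : Int)) ch =
          (dic.insert ch (PySem.Int.toStr (K.length : Int)),
           acc ++ [PySem.Int.toStr (K.length : Int)], (K.length : Int) + 1) := by
        simp [patternDictLoop, hcont, hch]
      have hcast : ((K.length : Int) + 1) = ((K ++ [ch]).length : Int) := by
        simp
      have hinv' : ∀ c : Char,
          (dic.insert ch (PySem.Int.toStr (K.length : Int))).get? c =
          if c ∈ K ++ [ch] then some (PySem.Int.toStr ((K ++ [ch]).idxOf c : Int)) else none := by
        intro c
        rw [PySem.Dict.get?_insert]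
        by_cases hc : c = ch
        · subst hc
          simp [List.idxOf_append_of_notMem hch, List.idxOf_cons_self]
        · rw [if_neg hc, hinv c]
          by_cases hmem : c ∈ K
          · simp [hmem, List.idxOf_append_of_mem hmem]
          · have : c ∉ K ++ [ch] := by simp [hmem, hc]
            simp [hmem, this]
      rw [List.foldl_cons, hstep, hcast, ih (K ++ [ch]) _ _ hinv', refPat]
      simp [hch]

/-- B's per-character pass, against any lookup that agrees with final first-occurrence indices. -/
lemma B_map (g : Char → String) (F : List Char)
    (hg : ∀ c ∈ F, g c = PySem.Int.toStr (F.idxOf c : Int)) :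
    ∀ (l K : List Char), PySem.Set.update K l = F → l.map g = refPat K l := by
  intro l
  induction l with
  | nil => intro K _; simp [refPat]
  | cons ch t ih =>
    intro K hF
    rw [PySem.Set.update_cons] at hF
    by_cases hch : ch ∈ K
    · rw [set_add_of_mem hch] at hF
      obtain ⟨t', ht'⟩ := update_prefix t K
      have hFdec : F = K ++ t' := by rw [← hF, ht']
      have hchF : ch ∈ F := by rw [hFdec]; exact List.mem_append_left _ hch
      have : g ch = PySem.Int.toStr (K.idxOf ch : Int) := by
        rw [hg ch hchF, hFdec, List.idxOf_append_of_mem hch]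
      simp [refPat, hch, this, ih K hF]
    · rw [set_add_of_not_mem hch] at hF
      obtain ⟨t', ht'⟩ := update_prefix t (K ++ [ch])
      have hFdec : F = K ++ [ch] ++ t' := by rw [← hF, ht']
      have hchF : ch ∈ F := by rw [hFdec]; simp
      have : g ch = PySem.Int.toStr (K.length : Int) := by
        rw [hg ch hchF, hFdec, List.append_assoc,
            List.idxOf_append_of_notMem hch]
        simp [List.idxOf_cons_self]
      simp [refPat, hch, this, ih (K ++ [ch]) hF]

/-- `w.index(c)` for `c ∈ w` is `idxOf`. -/
lemma index?_getD_eq_idxOf : ∀ (cs : List Char) (c : Char), c ∈ cs →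
    (PySem.List.index? cs c).getD 0 = cs.idxOf c := by
  intro cs
  induction cs with
  | nil => intro c hc; simp at hc
  | cons k t ih =>
    intro c hc
    by_cases hck : k = c
    · subst hck
      rw [PySem.List.index?_cons_self]
      simp [List.idxOf_cons_self]
    · have hct : c ∈ t := (List.mem_cons.mp hc).resolve_left (fun h => hck h.symm)
      have hs : ∃ j, PySem.List.index? t c = some j := by
        have := (PySem.List.index?_isSome_iff (xs := t) (v := c)).mpr hct
        exact Option.isSome_iff_exists.mp this
      obtain ⟨j, hj⟩ := hs
      rw [PySem.List.index?_cons_of_ne t hck, hj]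
      have := ih c hct
      rw [hj] at this
      simp at this
      simp [List.idxOf_cons_ne _ hck, ← this]

/-- The distinct-count of the prefix before `c`'s first occurrence is `c`'s rank among
the distinct letters, relative to any already-seen set `K` not containing `c`. -/
lemma distinct_prefix_rank : ∀ (cs K : List Char) (c : Char), c ∈ cs → c ∉ K →
    (PySem.Set.update K (cs.take (cs.idxOf c))).length = (PySem.Set.update K cs).idxOf c := by
  intro cs
  induction cs with
  | nil => intro K c hc _; simp at hc
  | cons k t ih =>
    intro K c hc hcK
    by_cases hck : c = k
    · subst hck
      rw [List.idxOf_cons_self]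
      simp only [List.take_zero]
      rw [PySem.Set.update_cons, set_add_of_not_mem hcK]
      obtain ⟨t', ht'⟩ := update_prefix t (K ++ [c])
      rw [ht', List.append_assoc, List.idxOf_append_of_notMem hcK]
      simp [PySem.Set.update, List.idxOf_cons_self]
    · have hkc : k ≠ c := fun h => hck h.symm
      have hct : c ∈ t := (List.mem_cons.mp hc).resolve_left hck
      rw [List.idxOf_cons_ne _ hkc, List.take_succ_cons,
          PySem.Set.update_cons, PySem.Set.update_cons]
      have hcK' : c ∉ PySem.Set.add K k := by
        by_cases hk : k ∈ K
        · rw [set_add_of_mem hk]; exact hcK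
        · rw [set_add_of_not_mem hk]; simp [hcK, hck]
      exact ih (PySem.Set.add K k) c hct hcK'

-- ===== VERDICT (by name: the statement is the Claim_ definition above) =====
theorem patternDict_spec : Claim_equal_patternDict := by
  intro word _
  unfold Spec_patternDict patternDict patternDict_alt
  dsimp only
  generalize (PySem.Str.upper word).toList = cs
  have hA : (cs.foldl patternDictLoop (PySem.Dict.empty, [], 0)).2.1 =
      refPat [] cs := by
    have h0 : ((0 : Int) = (([] : List Char).length : Int)) := by simp
    rw [h0]
    exact A_loop cs [] PySem.Dict.empty [] (by intro c; simp [PySem.Dict.get?_empty])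
  have hB : cs.map (fun ch =>
      PySem.Int.toStr (PySem.Set.len
        (PySem.Set.ofList (cs.take ((PySem.List.index? cs ch).getD 0))))) =
      refPat [] cs := by
    apply B_map _ (PySem.List.dedup cs)
    · intro c hc
      have hccs : c ∈ cs := (PySem.List.mem_dedup cs c).mp hc
      rw [index?_getD_eq_idxOf cs c hccs]
      have h := distinct_prefix_rank cs [] c hccs (by simp)
      rw [PySem.Set.update_nil_left] at h
      rw [PySem.Set.update_nil_left] at h
      rw [← PySem.List.dedup_eq_ofList] at h
      simp [PySem.Set.len, ← PySem.List.dedup_eq_ofList, h]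
    · rw [PySem.Set.update_nil_left, ← PySem.List.dedup_eq_ofList]
  rw [hA, hB]
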